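-- pv_equiv track=rewrite | github.com/krinj/word-puzzle-engine | wpg/util.py | lexi_collisions
-- ===== SOURCE A (Python) =====
-- def lexi_collisions(word1, word2):
--     # Find the number of duplicate letters in the two words.
--     copy_word1 = [x for x in word1]
--     copy_word2 = [x for x in word2]
--     collisions = 0
--     for i in copy_word1:
--         if i in copy_word2:
--             copy_word2.remove(i)
--             collisions += _get_collision_score(i)
--     return collisions
--
-- def _get_collision_score(letter):
--     # TODO: Adjust this for other alphabets.
--     # Give lower points for vowels because they are so common.
--     if letter in "aeiou":
--         return 1
--     else:
--         return 2
-- ===== SOURCE B (Python) =====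
-- def lexi_collisions(word1, word2):
--     # Sort both words, then merge with two pointers, scoring matched letters.
--     a = sorted(word1)
--     b = sorted(word2)
--     i = j = 0
--     collisions = 0
--     while i < len(a) and j < len(b):
--         if a[i] == b[j]:
--             collisions += _get_collision_score(a[i])
--             i += 1
--             j += 1
--         elif a[i] < b[j]:
--             i += 1
--         else:
--             j += 1
--     return collisions
--
-- def _get_collision_score(letter):
--     if letter in "aeiou":
--         return 1
--     else:
--         return 2
-- ===== Notes on version B (the rewrite author's own statement) =====
-- stated objective: alternative
-- what changed: Replaces A's scan-and-remove over a mutable copy of word2 by sort-then-merge: both words are sorted and a two-pointer merge walks them once, scoring letters where the heads match (the multiset intersection), so no membership scans or removals occur.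
import Mathlib
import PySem

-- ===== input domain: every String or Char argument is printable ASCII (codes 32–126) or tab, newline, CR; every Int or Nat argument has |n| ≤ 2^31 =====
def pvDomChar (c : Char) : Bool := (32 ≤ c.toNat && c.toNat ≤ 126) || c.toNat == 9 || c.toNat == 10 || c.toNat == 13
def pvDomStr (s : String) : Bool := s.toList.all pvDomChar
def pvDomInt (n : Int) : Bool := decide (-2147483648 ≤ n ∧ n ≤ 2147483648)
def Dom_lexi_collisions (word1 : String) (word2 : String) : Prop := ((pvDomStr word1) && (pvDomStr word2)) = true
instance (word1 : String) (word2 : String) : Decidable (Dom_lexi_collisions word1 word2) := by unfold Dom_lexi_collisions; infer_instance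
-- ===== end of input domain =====

-- B replaces A's scan-and-remove over a mutable copy of word2 by sort-then-merge:
-- sort both words and score the matched heads in a two-pointer merge (objective: alternative).


-- ===== PORT A =====
-- _get_collision_score: 'letter in "aeiou"' on a length-1 string = char membership (exact here)
def pyGetCollisionScore (letter : Char) : Int :=
  if "aeiou".toList.contains letter then 1 else 2

def lexi_collisions (word1 : String) (word2 : String) : Int :=
  let copy_word1 := word1.toList
  let copy_word2 := word2.toList
  let st := copy_word1.foldl
    (fun (st : List Char × Int) i =>
      if st.1.contains i then
        -- remove? succeeds under the contains guard; getD only totalizes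
        ((PySem.List.remove? st.1 i).getD st.1, st.2 + pyGetCollisionScore i)
      else st)
    (copy_word2, 0)
  st.2

-- ===== PORT B =====
-- the while loop of Source B: consume the two sorted lists with the accumulator `collisions`
def mergeCollisions : List Char → List Char → Int → Int
  | [], _, collisions => collisions
  | _ :: _, [], collisions => collisions
  | x :: a, y :: b, collisions =>
    if x = y then mergeCollisions a b (collisions + pyGetCollisionScore x)
    else if x < y then mergeCollisions a (y :: b) collisions
    else mergeCollisions (x :: a) b collisions
termination_by a b _ => a.length + b.length

def lexi_collisions_alt (word1 : String) (word2 : String) : Int :=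
  let a := PySem.List.sorted word1.toList (fun x => x) false
  let b := PySem.List.sorted word2.toList (fun x => x) false
  mergeCollisions a b 0

-- ===== PRECONDITION & SPEC =====
def Spec_lexi_collisions (word1 : String) (word2 : String) (out : Int) : Prop := out = lexi_collisions_alt word1 word2
instance (word1 : String) (word2 : String) (out : Int) : Decidable (Spec_lexi_collisions word1 word2 out) := by unfold Spec_lexi_collisions; infer_instance

-- ===== CLAIM (what is proved, stated in full; the proofs are below) =====
def Claim_equal_lexi_collisions : Prop := ∀ (word1 : String) (word2 : String), Dom_lexi_collisions word1 word2 → Spec_lexi_collisions word1 word2 (lexi_collisions word1 word2)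

-- ===== LEMMAS AND PROOFS =====

-- Canonical value both programs compute: the scores of the multiset intersection.
def interScore (s t : Multiset Char) : Int := ((s ∩ t).map pyGetCollisionScore).sum

theorem interScore_nil_left (t : Multiset Char) : interScore 0 t = 0 := by
  simp [interScore]

theorem interScore_nil_right (s : Multiset Char) : interScore s 0 = 0 := by
  simp [interScore]

theorem interScore_cons_of_mem (x : Char) (s t : Multiset Char) (h : x ∈ t) :
    interScore (x ::ₘ s) t = pyGetCollisionScore x + interScore s (t.erase x) := by
  unfold interScore
  rw [Multiset.cons_inter_of_pos _ h, Multiset.map_cons, Multiset.sum_cons]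

theorem interScore_cons_of_notMem (x : Char) (s t : Multiset Char) (h : x ∉ t) :
    interScore (x ::ₘ s) t = interScore s t := by
  unfold interScore
  rw [Multiset.cons_inter_of_neg _ h]

theorem interScore_comm (s t : Multiset Char) : interScore s t = interScore t s := by
  unfold interScore
  rw [Multiset.inter_comm]

-- A's loop computes acc + interScore.
theorem lexi_A_loop (w : List Char) (l : List Char) (acc : Int) :
    (w.foldl
      (fun (st : List Char × Int) i =>
        if st.1.contains i then
          ((PySem.List.remove? st.1 i).getD st.1, st.2 + pyGetCollisionScore i)
        else st) (l, acc)).2 = acc + interScore (↑w) (↑l) := by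
  induction w generalizing l acc with
  | nil => simp [interScore_nil_left]
  | cons i w ih =>
    simp only [List.foldl_cons]
    by_cases hi : i ∈ l
    · have hc : l.contains i = true := by simpa using hi
      have hrem : PySem.List.remove? l i = some (l.erase i) :=
        PySem.List.remove?_eq_some_erase l i hi
      rw [hc]
      simp only [if_true, hrem, Option.getD_some]
      rw [ih]
      have : (↑(i :: w) : Multiset Char) = i ::ₘ ↑w := rfl
      rw [this, interScore_cons_of_mem i _ _ (by simpa using hi)]
      have : ((↑(l.erase i) : Multiset Char)) = (↑l : Multiset Char).erase i := by
        simp [Multiset.coe_erase]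
      rw [this]; ring
    · have hc : l.contains i = false := by simpa using hi
      rw [hc]
      simp only [Bool.false_eq_true, if_false]
      rw [ih]
      have : (↑(i :: w) : Multiset Char) = i ::ₘ ↑w := rfl
      rw [this, interScore_cons_of_notMem i _ _ (by simpa using hi)]

-- B's merge computes acc + interScore on sorted inputs (induction on total length).
theorem mergeCollisions_eq_aux (n : Nat) (a b : List Char) (acc : Int)
    (hn : a.length + b.length ≤ n)
    (ha : a.Pairwise (· ≤ ·)) (hb : b.Pairwise (· ≤ ·)) :
    mergeCollisions a b acc = acc + interScore (↑a) (↑b) := by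
  induction n generalizing a b acc with
  | zero =>
    match a, b with
    | [], b => simp [mergeCollisions, interScore_nil_left]
    | x :: a, b => simp at hn
  | succ n ih =>
    match a, b with
    | [], b => simp [mergeCollisions, interScore_nil_left]
    | x :: a, [] => simp [mergeCollisions, interScore_nil_right]
    | x :: a, y :: b =>
      have hta : a.Pairwise (· ≤ ·) := (List.pairwise_cons.mp ha).2
      have htb : b.Pairwise (· ≤ ·) := (List.pairwise_cons.mp hb).2
      have hlen : a.length + b.length + 1 ≤ n := by
        simp only [List.length_cons] at hn; omega
      simp only [mergeCollisions]
      split_ifs with h1 h2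
      · subst h1
        rw [ih a b _ (by omega) hta htb]
        have hx1 : (↑(x :: a) : Multiset Char) = x ::ₘ ↑a := rfl
        have hx2 : (↑(x :: b) : Multiset Char) = x ::ₘ ↑b := rfl
        rw [hx1, hx2, interScore_cons_of_mem x _ _ (Multiset.mem_cons_self x ↑b),
            Multiset.erase_cons_head]
        ring
      · rw [ih a (y :: b) acc (by simp only [List.length_cons]; omega) hta hb]
        have hx : x ∉ (y :: b) := by
          intro hmem
          rcases List.mem_cons.mp hmem with h | h
          · exact h1 h
          · exact absurd h2 (not_lt.mpr ((List.pairwise_cons.mp hb).1 x h))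
        have hx1 : (↑(x :: a) : Multiset Char) = x ::ₘ ↑a := rfl
        rw [hx1, interScore_cons_of_notMem x _ _ (by simpa using hx)]
      · rw [ih (x :: a) b acc (by simp only [List.length_cons]; omega) ha htb]
        have hy : y ∉ (x :: a) := by
          intro hmem
          rcases List.mem_cons.mp hmem with h | h
          · exact h1 h.symm
          · have hylt : y < x := lt_of_le_of_ne (not_lt.mp h2) (fun h' => h1 h'.symm)
            exact absurd hylt (not_lt.mpr ((List.pairwise_cons.mp ha).1 y h))
        have hy2 : (↑(y :: b) : Multiset Char) = y ::ₘ ↑b := rfl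
        have hym : y ∉ (↑(x :: a) : Multiset Char) := by
          simpa using hy
        rw [hy2, interScore_comm (↑(x :: a) : Multiset Char) (y ::ₘ (↑b : Multiset Char)),
            interScore_cons_of_notMem y _ _ hym, interScore_comm]

theorem mergeCollisions_eq (a b : List Char) (acc : Int)
    (ha : a.Pairwise (· ≤ ·)) (hb : b.Pairwise (· ≤ ·)) :
    mergeCollisions a b acc = acc + interScore (↑a) (↑b) :=
  mergeCollisions_eq_aux (a.length + b.length) a b acc le_rfl ha hb

theorem sorted_coe (l : List Char) :
    (↑(PySem.List.sorted l (fun x => x) false) : Multiset Char) = ↑l :=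
  Multiset.coe_eq_coe.mpr (PySem.List.sorted_perm l _ _)

-- ===== VERDICT (by name: the statement is the Claim_ definition above) =====
theorem lexi_collisions_spec : Claim_equal_lexi_collisions := by
  intro word1 word2 _
  unfold Spec_lexi_collisions lexi_collisions lexi_collisions_alt
  rw [lexi_A_loop, mergeCollisions_eq _ _ _
        (by simpa using PySem.List.sorted_pairwise word1.toList (fun x => x))
        (by simpa using PySem.List.sorted_pairwise word2.toList (fun x => x)),
      sorted_coe, sorted_coe]
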